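-- pv_equiv track=rewrite | github.com/katGhost/casino-mini | app.py | is_a_pair
-- ===== SOURCE A (Python) =====
-- def is_a_pair(_hand):
--     ranks = [card[1] for card in _hand]
--     counts = {}
--     for rank in ranks:
--         if rank in counts:
--             counts[rank] += 1
--         else:
--             counts[rank] = 1
--
--     for rank, count in counts.items():
--         if count == 2:
--             return True
--     return False
-- ===== SOURCE B (Python) =====
-- def is_a_pair(_hand):
--     ranks = sorted(card[1] for card in _hand)
--     prev = None
--     run = 0
--     for r in ranks:
--         if r == prev:
--             run += 1
--         else:
--             if run == 2:
--                 return True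
--             prev = r
--             run = 1
--     return run == 2
-- ===== Notes on version B (the rewrite author's own statement) =====
-- stated objective: alternative
-- what changed: Replaced the dictionary frequency table and second items pass with a sort of the rank list followed by a single run-length scan that reports a completed run of length exactly 2.
import Mathlib
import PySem

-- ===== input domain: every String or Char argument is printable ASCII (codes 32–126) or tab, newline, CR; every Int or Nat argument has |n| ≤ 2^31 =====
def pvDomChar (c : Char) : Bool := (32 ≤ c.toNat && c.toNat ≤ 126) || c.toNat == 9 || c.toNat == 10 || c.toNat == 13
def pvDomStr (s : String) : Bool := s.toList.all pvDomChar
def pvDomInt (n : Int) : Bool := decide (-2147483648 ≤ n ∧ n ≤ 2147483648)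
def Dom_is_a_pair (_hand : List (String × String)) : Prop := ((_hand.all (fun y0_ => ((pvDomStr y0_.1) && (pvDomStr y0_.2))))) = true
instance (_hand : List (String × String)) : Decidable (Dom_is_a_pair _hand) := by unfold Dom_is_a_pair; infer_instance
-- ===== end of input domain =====

-- B replaces A's dictionary frequency table (and its second pass over items) with a
-- sort of the rank list followed by one run-length scan; alternative algorithm, same result.

-- ===== PORT A =====
def is_a_pair (_hand : List (String × String)) : Bool :=
  let ranks := _hand.map (fun card => card.2)
  let counts := ranks.foldl
    (fun d rank => if d.contains rank then d.modify rank 0 (· + 1) else d.insert rank (1 : Int))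
    PySem.Dict.empty
  counts.items.any (fun p => p.2 == (2 : Int))

-- ===== PORT B =====
-- the for-loop of Source B over the sorted ranks, with its early return on a completed run of 2
def pairScan (prev : Option String) (run : Nat) : List String → Bool
  | [] => run == 2
  | r :: rest =>
    if some r == prev then pairScan prev (run + 1) rest
    else if run == 2 then true
    else pairScan (some r) 1 rest

def is_a_pair_alt (_hand : List (String × String)) : Bool :=
  pairScan none 0 (PySem.List.sorted (_hand.map (fun card => card.2)) (fun x => x) false)

-- ===== PRECONDITION & SPEC =====
def Spec_is_a_pair (_hand : List (String × String)) (out : Bool) : Prop := out = is_a_pair_alt _hand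
instance (_hand : List (String × String)) (out : Bool) : Decidable (Spec_is_a_pair _hand out) := by unfold Spec_is_a_pair; infer_instance

-- ===== CLAIM (what is proved, stated in full; the proofs are below) =====
def Claim_equal_is_a_pair : Prop := ∀ (_hand : List (String × String)), Dom_is_a_pair _hand → Spec_is_a_pair _hand (is_a_pair _hand)

-- ===== LEMMAS AND PROOFS =====

-- A's per-element dict update is exactly Counter's update
theorem step_eq_modify (d : PySem.Dict String Int) (x : String) :
    (if d.contains x then d.modify x 0 (· + 1) else d.insert x (1 : Int)) = d.modify x 0 (· + 1) := by
  by_cases h : d.contains x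
  · simp [h]
  · have h' : d.contains x = false := by simpa using h
    simp [h, PySem.Dict.modify, PySem.Dict.insert,
      PySem.Dict.getD_of_not_contains (d := d) (k := x) (d0 := 0) h']

theorem a_iff (h : List (String × String)) :
    is_a_pair h = true ↔ ∃ r, (h.map (fun card => card.2)).count r = 2 := by
  unfold is_a_pair
  have hf : (fun (d : PySem.Dict String Int) rank =>
      if d.contains rank then d.modify rank 0 (· + 1) else d.insert rank (1 : Int))
      = fun d rank => d.modify rank 0 (· + 1) := by
    funext d x; exact step_eq_modify d x
  rw [hf]
  show (PySem.Dict.counter (h.map (fun card => card.2))).items.any (fun p => p.2 == (2 : Int)) = true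
      ↔ ∃ r, (h.map (fun card => card.2)).count r = 2
  rw [PySem.Dict.items_counter]
  simp only [List.any_map, List.any_eq_true, Function.comp, beq_iff_eq,
    PySem.Set.mem_ofList]
  constructor
  · rintro ⟨r, _, hc⟩
    exact ⟨r, by exact_mod_cast hc⟩
  · rintro ⟨r, hc⟩
    refine ⟨r, ?_, by exact_mod_cast hc⟩
    exact List.count_pos_iff.mp (by omega)

-- invariant of Source B's scan: with a current run of `run ≥ 1` copies of `p`, over a sorted
-- tail whose elements all dominate `p`, it reports a completed run of length exactly 2
theorem scan_spec (l : List String) (p : String) (run : Nat) (hrun : 1 ≤ run)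
    (hsort : l.Pairwise (· ≤ ·)) (hp : ∀ x ∈ l, p ≤ x) :
    pairScan (some p) run l = true ↔
      (run + l.count p = 2 ∨ ∃ r ∈ l, r ≠ p ∧ l.count r = 2) := by
  induction l generalizing p run with
  | nil => simp [pairScan]
  | cons r rest ih =>
    have hsort' : rest.Pairwise (· ≤ ·) := hsort.tail
    have hr_le : ∀ x ∈ rest, r ≤ x := fun x hx => (List.pairwise_cons.mp hsort).1 x hx
    by_cases hrp : r = p
    · subst hrp
      have hp' : ∀ x ∈ rest, r ≤ x := hr_le
      rw [show pairScan (some r) run (r :: rest) = pairScan (some r) (run + 1) rest by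
        simp [pairScan]]
      rw [ih r (run + 1) (by omega) hsort' hp']
      constructor
      · rintro (hc | ⟨r', hm, hne, hc⟩)
        · left; simp; omega
        · right
          exact ⟨r', List.mem_cons_of_mem _ hm, hne,
            by simp [(by simpa [eq_comm] using hne : ¬ r = r')]; omega⟩
      · rintro (hc | ⟨r', hm, hne, hc⟩)
        · left; simp at hc ⊢; omega
        · right
          have hm' : r' ∈ rest := by
            rcases List.mem_cons.mp hm with h1 | h1
            · exact absurd h1 hne
            · exact h1
          refine ⟨r', hm', hne, ?_⟩
          have : ¬ r = r' := by simpa [eq_comm] using hne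
          simp [this] at hc
          omega
    · -- a new rank starts: p never reappears in rest
      have hpr : p ≤ r := hp r (List.mem_cons_self ..)
      have hpnot : p ∉ rest := by
        intro hmem
        exact hrp (le_antisymm (hr_le p hmem) hpr)
      have hpnotc : p ∉ r :: rest := by
        simp only [List.mem_cons]
        rintro (h1 | h1)
        · exact hrp h1.symm
        · exact hpnot h1
      have hcount_p : (r :: rest).count p = 0 := List.count_eq_zero_of_not_mem hpnotc
      rw [show pairScan (some p) run (r :: rest)
            = if run == 2 then true else pairScan (some r) 1 rest by
        simp [pairScan, hrp]]
      by_cases hr2 : run = 2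
      · simp [hr2, hcount_p]
      · have hne2 : (run == 2) = false := by simpa using hr2
        rw [hne2]
        simp only [Bool.false_eq_true, if_false]
        rw [ih r 1 (by omega) hsort' hr_le]
        have hcp0 : rest.count p = 0 := List.count_eq_zero_of_not_mem hpnot
        constructor
        · rintro (hc | ⟨r', hm, hne, hc⟩)
          · right
            refine ⟨r, List.mem_cons_self .., fun h => hrp h, ?_⟩
            simp; omega
          · right
            have hr'p : r' ≠ p := fun h => hpnot (h ▸ hm)
            refine ⟨r', List.mem_cons_of_mem _ hm, hr'p, ?_⟩
            simp [(by simpa [eq_comm] using hne : ¬ r = r')]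
            omega
        · rintro (hc | ⟨r', hm, hne, hc⟩)
          · omega
          · by_cases hr'r : r' = r
            · subst hr'r
              left
              simp at hc
              omega
            · right
              have hm' : r' ∈ rest := by
                rcases List.mem_cons.mp hm with h1 | h1
                · exact absurd h1 hr'r
                · exact h1
              refine ⟨r', hm', hr'r, ?_⟩
              simp [(by simpa [eq_comm] using hr'r : ¬ r = r')] at hc
              omega

theorem alt_iff (h : List (String × String)) :
    is_a_pair_alt h = true ↔ ∃ r, (h.map (fun card => card.2)).count r = 2 := by
  unfold is_a_pair_alt
  set ranks := h.map (fun card => card.2) with hranks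
  have hperm : (PySem.List.sorted ranks (fun x => x) false).Perm ranks :=
    PySem.List.sorted_perm ..
  have hpw : (PySem.List.sorted ranks (fun x => x) false).Pairwise (fun a b => a ≤ b) := by
    simpa using PySem.List.sorted_pairwise (xs := ranks) (key := fun x => x)
  rcases hs : PySem.List.sorted ranks (fun x => x) false with _ | ⟨m, t⟩
  · have : ranks = [] := by
      have := hperm; rw [hs] at this; exact this.symm.eq_nil
    simp [pairScan, this]
  · rw [hs] at hperm hpw
    have hm_le : ∀ x ∈ t, m ≤ x := fun x hx => (List.pairwise_cons.mp hpw).1 x hx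
    rw [show pairScan none 0 (m :: t) = pairScan (some m) 1 t by simp [pairScan]]
    rw [scan_spec t m 1 (by omega) hpw.tail hm_le]
    have hcnt : ∀ r, ranks.count r = (m :: t).count r := fun r => (hperm.count_eq r).symm
    constructor
    · rintro (hc | ⟨r, hm, hne, hc⟩)
      · exact ⟨m, by rw [hcnt]; simp; omega⟩
      · refine ⟨r, ?_⟩
        rw [hcnt]
        simp [(by simpa [eq_comm] using hne : ¬ m = r)]
        omega
    · rintro ⟨r, hc⟩
      rw [hcnt] at hc
      by_cases hrm : r = m
      · subst hrm
        left
        simp at hc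
        omega
      · right
        have hmem : r ∈ m :: t := List.count_pos_iff.mp (by omega)
        have hmt : r ∈ t := by
          rcases List.mem_cons.mp hmem with h1 | h1
          · exact absurd h1 hrm
          · exact h1
        refine ⟨r, hmt, hrm, ?_⟩
        simp [(by simpa [eq_comm] using hrm : ¬ m = r)] at hc
        omega

-- ===== VERDICT (by name: the statement is the Claim_ definition above) =====
theorem is_a_pair_spec : Claim_equal_is_a_pair := by
  intro hand _
  unfold Spec_is_a_pair
  rw [Bool.eq_iff_iff, a_iff, alt_iff]
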